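-- pv_equiv track=rewrite | github.com/matthewelse/british-informatics-olympiad | 2014/q3.py | solve
-- ===== SOURCE A (Python) =====
-- def count(begins_with, length, memos):
--     assert length <= 36 and length > 0
--     assert begins_with >= 0 and begins_with < 36
--
--     if length == 0:
--         return 0
--     if length == 1:
--         return 1
--
--     if (begins_with, length) in memos:
--         return memos[begins_with, length]
--
--     result = sum(count(i, length - 1, memos) for i in range(begins_with + 1, 36))
--
--     memos[begins_with, length] = result
--     return result
--
-- translate_char = "ABCDEFGHIJKLMNOPQRSTUVWXYZ0123456789"
--
-- def compute_length_of_nth_password_and_number_of_shorter_passwords(nth, memos):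
--     cumulative = 0
--     shorter_passwords = 0
--
--     for length_candidate in range(1, 37):
--         for c in range(36):
--             this_count = count(c, length_candidate, memos)
--             cumulative += this_count
--
--             if cumulative >= nth:
--                 return length_candidate, shorter_passwords
--
--         shorter_passwords = cumulative
--
--     raise RuntimeError("n is too large.")
--
-- def solve(nth):
--     result = []
--     memos = {}
--
--     # Start by figuring out what the length should be, and how many passwords
--     # we're skipping over due to length.
--     (
--         length,
--         shorter_passwords,
--     ) = compute_length_of_nth_password_and_number_of_shorter_passwords(nth, memos)
--     nth -= shorter_passwords
--
--     # Then compute each character individually.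
--     previous_character = -1
--
--     while length > 0:
--         cumulative = 0
--
--         for c in range(previous_character + 1, 36):
--             cumulative += count(c, length, memos)
--
--             if cumulative >= nth:
--                 result.append(translate_char[c])
--                 previous_character = c
--                 break
--
--         nth = nth - (cumulative - count(previous_character, length, memos))
--         length -= 1
--
--     return "".join(result)
-- ===== SOURCE B (Python) =====
-- TRANSLATE = "ABCDEFGHIJKLMNOPQRSTUVWXYZ0123456789"
--
-- def _comb(n, k):
--     # binomial coefficient via the multiplicative formula
--     if k < 0 or k > n:
--         return 0
--     r = 1
--     for i in range(k):
--         r = r * (n - i) // (i + 1)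
--     return r
--
-- def solve(nth):
--     # A password of length L is a subset of 36 symbols: C(36, L) of them.
--     # Find the length of the nth password, counting shorter ones first.
--     cumulative = 0
--     length = None
--     for cand in range(1, 37):
--         total = _comb(36, cand)
--         if cumulative + total >= nth:
--             length = cand
--             break
--         cumulative += total
--     if length is None:
--         raise RuntimeError("n is too large.")
--     m = nth - cumulative
--     # Unrank: greedily pick each character, skipping whole blocks by count.
--     chars = []
--     prev = -1
--     for remaining in range(length, 0, -1):
--         for c in range(prev + 1, 36):
--             cnt = _comb(35 - c, remaining - 1)
--             if m <= cnt:
--                 chars.append(TRANSLATE[c])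
--                 prev = c
--                 break
--             m -= cnt
--     return "".join(chars)
-- ===== Notes on version B (the rewrite author's own statement) =====
-- stated objective: simpler
-- what changed: A counts passwords with a memoized recursion over (first-char, length) pairs threaded through a dict; B computes the same counts in closed form as binomial coefficients (multiplicative formula) and unranks the nth password directly by skipping whole blocks, with no memo table and no recursion.
import Mathlib
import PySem

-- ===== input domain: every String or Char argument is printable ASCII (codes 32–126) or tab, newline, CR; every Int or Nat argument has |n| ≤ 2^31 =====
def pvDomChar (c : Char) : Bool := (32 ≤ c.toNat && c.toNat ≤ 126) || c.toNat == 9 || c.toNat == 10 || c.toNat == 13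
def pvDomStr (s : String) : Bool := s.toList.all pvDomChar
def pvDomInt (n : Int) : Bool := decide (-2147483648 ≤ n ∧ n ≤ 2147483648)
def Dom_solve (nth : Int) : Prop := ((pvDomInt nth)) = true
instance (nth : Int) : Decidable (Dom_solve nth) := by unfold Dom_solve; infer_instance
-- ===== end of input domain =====

-- B replaces A's memoized recursive password counting by closed-form binomial
-- coefficients (multiplicative formula) and a direct unranking loop; objective: simpler.

-- ===== PORT A =====

-- translate_char[c] (c is always in range in both programs, so getD's default is never used)
def tchar (c : Int) : Char :=
  (PySem.List.pyGet? "ABCDEFGHIJKLMNOPQRSTUVWXYZ0123456789".toList c).getD ' '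

abbrev Memo := PySem.Dict (Int × Int) Int

-- count(begins_with, length, memos); length is 0..36 at every call and is carried as a
-- Nat so the recursion on length-1 is structural. The asserts hold at every reachable
-- call and are omitted. The generator sum threads the mutated memo dict left to right.
def countA : Int → Nat → Memo → Int × Memo
  | _, 0, m => (0, m)
  | _, 1, m => (1, m)
  | b, (lp+2), m =>
    match m.get? (b, ((lp+2 : Nat) : Int)) with
    | some v => (v, m)
    | none =>
      let p := (PySem.List.pyRange (b + 1) 36 1).foldl
        (fun acc i => let r := countA i (lp+1) acc.2; (acc.1 + r.1, r.2)) (0, m)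
      (p.1, p.2.insert (b, ((lp+2 : Nat) : Int)) p.1)

-- inner `for c in range(36)` of compute_length_of_nth_password_…: (broke?, cumulative, memos)
def lenInnerA (cs : List Int) (L : Nat) (cum nth : Int) (m : Memo) : Bool × Int × Memo :=
  match cs with
  | [] => (false, cum, m)
  | c :: rest =>
    let r := countA c L m
    let cum' := cum + r.1
    if nth ≤ cum' then (true, cum', r.2)
    else lenInnerA rest L cum' nth r.2

-- outer `for length_candidate in range(1, 37)`; none = raise RuntimeError("n is too large.")
def lenOuterA (ls : List Int) (cum nth : Int) (m : Memo) : Option (Int × Int × Memo) :=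
  match ls with
  | [] => none
  | L :: rest =>
    let r := lenInnerA (PySem.List.pyRange 0 36 1) L.toNat cum nth m
    if r.1 then some (L, cum, r.2.2)
    else lenOuterA rest r.2.1 nth r.2.2

-- inner `for c in range(previous_character + 1, 36)` of solve: (chosen c?, cumulative, memos)
def charInnerA (cs : List Int) (L : Nat) (cum nth : Int) (m : Memo) : Option Int × Int × Memo :=
  match cs with
  | [] => (none, cum, m)
  | c :: rest =>
    let r := countA c L m
    let cum' := cum + r.1
    if nth ≤ cum' then (some c, cum', r.2)
    else charInnerA rest L cum' nth r.2

-- `while length > 0` of solve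
def mainLoopA (nth prev : Int) (length : Nat) (res : List Char) (m : Memo) : List Char :=
  match length with
  | 0 => res
  | Nat.succ lp =>
    let r := charInnerA (PySem.List.pyRange (prev + 1) 36 1) (lp+1) 0 nth m
    let prev' := r.1.getD prev
    let res' := match r.1 with | some c => res ++ [tchar c] | none => res
    let pc := countA prev' (lp+1) r.2.2
    mainLoopA (nth - (r.2.1 - pc.1)) prev' lp res' pc.2

def solve (nth : Int) : String :=
  match lenOuterA (PySem.List.pyRange 1 37 1) 0 nth PySem.Dict.empty with
  | none => ""
  | some (L, shorter, m) => String.ofList (mainLoopA (nth - shorter) (-1) L.toNat [] m)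

-- ===== PORT B =====

-- _comb(n, k): the multiplicative formula for the binomial coefficient
def combB (n k : Int) : Int :=
  if k < 0 ∨ n < k then 0
  else (PySem.List.pyRange 0 k 1).foldl
    (fun r i => PySem.Int.floordiv (r * (n - i)) (i + 1)) 1

-- `for cand in range(1, 37)` with break; none = raise RuntimeError("n is too large.")
def findLenB (cands : List Int) (cum nth : Int) : Option (Int × Int) :=
  match cands with
  | [] => none
  | cand :: rest =>
    let total := combB 36 cand
    if nth ≤ cum + total then some (cand, cum)
    else findLenB rest (cum + total) nth

-- `for c in range(prev + 1, 36)` with break and `m -= cnt`: (chosen c?, final m)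
def pickB (cs : List Int) (rem m : Int) : Option Int × Int :=
  match cs with
  | [] => (none, m)
  | c :: rest =>
    let cnt := combB (35 - c) (rem - 1)
    if m ≤ cnt then (some c, m)
    else pickB rest rem (m - cnt)

-- `for remaining in range(length, 0, -1)`
def buildB (rems : List Int) (m prev : Int) (acc : List Char) : List Char :=
  match rems with
  | [] => acc
  | r :: rest =>
    let p := pickB (PySem.List.pyRange (prev + 1) 36 1) r m
    match p.1 with
    | some c => buildB rest p.2 c (acc ++ [tchar c])
    | none => buildB rest p.2 prev acc

-- bridge: B's binomial equals the pure count of A's recursion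

def solve_alt (nth : Int) : String :=
  match findLenB (PySem.List.pyRange 1 37 1) 0 nth with
  | none => ""
  | some (L, cum) => String.ofList (buildB (PySem.List.pyRange L 0 (-1)) (nth - cum) (-1) [])

-- ===== PRECONDITION & SPEC =====
def Spec_solve (nth : Int) (out : String) : Prop := out = solve_alt nth
instance (nth : Int) (out : String) : Decidable (Spec_solve nth out) := by unfold Spec_solve; infer_instance

-- ===== CLAIM (what is proved, stated in full; the proofs are below) =====
def Claim_equal_solve : Prop := ∀ (nth : Int), Dom_solve nth → Spec_solve nth (solve nth)

-- ===== LEMMAS AND PROOFS =====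

-- the pure (memo-free) value of A's count
def pcount : Int → Nat → Int
  | _, 0 => 0
  | _, 1 => 1
  | b, (lp+2) =>
    ((PySem.List.pyRange (b + 1) 36 1).map (fun i => pcount i (lp+1))).sum

theorem pcount_nonneg (l : Nat) : ∀ b, 0 ≤ pcount b l := by
  induction l using Nat.strong_induction_on with
  | _ l ih =>
    intro b
    match l with
    | 0 => simp [pcount]
    | 1 => simp [pcount]
    | (lp+2) =>
      rw [pcount]
      apply List.sum_nonneg
      intro x hx
      simp only [List.mem_map] at hx
      obtain ⟨i, _, rfl⟩ := hx
      exact ih (lp+1) (by omega) i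

theorem sum_choose (r : Nat) : ∀ (k : Nat), k ≤ 36 →
    ((PySem.List.pyRange (36 - (k : Int)) 36 1).map
      (fun i => (((35 - i).toNat.choose r : Nat) : Int))).sum = ((k.choose (r+1) : Nat) : Int) := by
  intro k
  induction k with
  | zero =>
    intro _
    rw [PySem.List.pyRange_one_eq_nil (by norm_num)]
    simp [Nat.choose_eq_zero_of_lt]
  | succ n ih =>
    intro h
    rw [PySem.List.pyRange_one_cons (by push_cast; omega)]
    simp only [List.map_cons, List.sum_cons]
    have e1 : (36 : Int) - ((n+1 : Nat) : Int) + 1 = 36 - (n : Int) := by push_cast; ring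
    rw [e1, ih (by omega)]
    have e2 : ((35 : Int) - (36 - ((n+1 : Nat) : Int))).toNat = n := by push_cast; omega
    rw [e2]
    have := Nat.choose_succ_succ (n+1) (r+1)
    push_cast [Nat.choose_succ_succ n r]
    ring

theorem pcount_eq_choose : ∀ (l : Nat), 1 ≤ l → ∀ b : Int, 0 ≤ b →
    pcount b l = (((35 - b).toNat.choose (l - 1) : Nat) : Int) := by
  intro l
  induction l using Nat.strong_induction_on with
  | _ l ih =>
    match l with
    | 0 => intro h; omega
    | 1 => intro _ b _; simp [pcount]
    | (lp+2) =>
      intro _ b hb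
      rw [pcount]
      by_cases hb35 : b ≤ 35
      · have hmap : (PySem.List.pyRange (b + 1) 36 1).map (fun i => pcount i (lp+1))
            = (PySem.List.pyRange (b + 1) 36 1).map (fun i => (((35 - i).toNat.choose lp : Nat) : Int)) := by
          apply List.map_congr_left
          intro i hi
          rw [PySem.List.mem_pyRange_one] at hi
          have := ih (lp+1) (by omega) (by omega) i (by omega)
          simpa using this
        rw [hmap]
        have hk : (36 : Int) - (((35 - b).toNat : Nat) : Int) = b + 1 := by omega
        have hs := sum_choose lp (35 - b).toNat (by omega)
        rw [hk] at hs
        rw [hs]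
        norm_num
      · rw [PySem.List.pyRange_one_eq_nil (by omega)]
        have : (35 - b).toNat = 0 := by omega
        simp [this, Nat.choose_eq_zero_of_lt]

-- memo invariant: every stored value is the pure count for its key
def Good (m : Memo) : Prop :=
  ∀ b li v, m.get? (b, li) = some v → ∃ l : Nat, li = (l : Int) ∧ v = pcount b l

theorem good_empty : Good PySem.Dict.empty := by
  intro b li v h
  simp [PySem.Dict.get?_empty] at h

theorem countA_spec : ∀ (l : Nat) (b : Int) (m : Memo), Good m →
    (countA b l m).1 = pcount b l ∧ Good (countA b l m).2 := by
  intro l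
  induction l using Nat.strong_induction_on with
  | _ l ih =>
    intro b m hm
    match l with
    | 0 => exact ⟨by simp [countA, pcount], hm⟩
    | 1 => exact ⟨by simp [countA, pcount], hm⟩
    | (lp+2) =>
      have IH : ∀ b m, Good m → (countA b (lp+1) m).1 = pcount b (lp+1) ∧ Good (countA b (lp+1) m).2 :=
        fun b m h => ih (lp+1) (by omega) b m h
      have hfold : ∀ (cs : List Int) (a : Int) (m : Memo), Good m →
          ((cs.foldl (fun acc i => let r := countA i (lp+1) acc.2; (acc.1 + r.1, r.2)) (a, m)).1
            = a + (cs.map (fun i => pcount i (lp+1))).sum)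
          ∧ Good ((cs.foldl (fun acc i => let r := countA i (lp+1) acc.2; (acc.1 + r.1, r.2)) (a, m)).2) := by
        intro cs
        induction cs with
        | nil => intro a m hm; exact ⟨by simp, hm⟩
        | cons c rest ihc =>
          intro a m hm
          simp only [List.foldl_cons, List.map_cons, List.sum_cons]
          obtain ⟨h1, h2⟩ := IH c m hm
          obtain ⟨h3, h4⟩ := ihc (a + (countA c (lp+1) m).1) (countA c (lp+1) m).2 h2
          constructor
          · rw [h3, h1]; ring
          · exact h4
      rw [countA]
      cases hget : m.get? (b, ((lp+2 : Nat) : Int)) with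
      | some v =>
        obtain ⟨l', hl', hv⟩ := hm b ((lp+2 : Nat) : Int) v hget
        have : l' = lp + 2 := by exact_mod_cast hl'.symm
        subst this
        exact ⟨by simpa using hv, hm⟩
      | none =>
        simp only
        obtain ⟨h1, h2⟩ := hfold (PySem.List.pyRange (b + 1) 36 1) 0 m hm
        constructor
        · rw [h1, pcount]; ring
        · intro b' li' v' hget'
          rw [PySem.Dict.get?_insert] at hget'
          by_cases heq : (b', li') = (b, ((lp+2 : Nat) : Int))
          · rw [if_pos heq] at hget'
            have hb' : b' = b := congrArg Prod.fst heq
            have hli' : li' = ((lp+2 : Nat) : Int) := congrArg Prod.snd heq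
            refine ⟨lp+2, hli', ?_⟩
            rw [hb']
            have hv' : v' = ((PySem.List.pyRange (b + 1) 36 1).foldl (fun acc i => let r := countA i (lp+1) acc.2; (acc.1 + r.1, r.2)) (0, m)).1 := by
              simpa using hget'.symm
            rw [hv', h1, pcount]; ring
          · rw [if_neg heq] at hget'
            exact h2 b' li' v' hget'

theorem combB_fold (n : Int) (hn : 0 ≤ n) : ∀ (kk : Nat), kk ≤ n.toNat →
    (PySem.List.pyRange 0 (kk : Int) 1).foldl
      (fun r i => PySem.Int.floordiv (r * (n - i)) (i + 1)) 1 = ((n.toNat.choose kk : Nat) : Int) := by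
  intro kk
  induction kk with
  | zero => intro _; rw [PySem.List.pyRange_one_eq_nil (by norm_num)]; simp
  | succ j ih =>
    intro h
    have e1 : ((j+1 : Nat) : Int) = (j : Int) + 1 := by push_cast; ring
    rw [e1, PySem.List.pyRange_one_succ_right (by positivity), List.foldl_append, ih (by omega)]
    simp only [List.foldl_cons, List.foldl_nil]
    have e2 : n - (j : Int) = ((n.toNat - j : Nat) : Int) := by omega
    rw [e2]
    have e3 : ((n.toNat.choose j : Nat) : Int) * ((n.toNat - j : Nat) : Int)
        = ((n.toNat.choose (j+1) * (j+1) : Nat) : Int) := by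
      have h5 := (Nat.choose_succ_right_eq n.toNat j).symm
      exact_mod_cast congrArg (fun x : Nat => (x : Int)) h5
    rw [e3]
    have e4 : ((j : Int) + 1) = ((j+1 : Nat) : Int) := by push_cast; ring
    rw [e4, PySem.Int.floordiv_natCast]
    rw [Nat.mul_div_cancel _ (by omega)]

theorem combB_eq_choose (n k : Int) (hn : 0 ≤ n) (hk : 0 ≤ k) :
    combB n k = ((n.toNat.choose k.toNat : Nat) : Int) := by
  by_cases hkn : n < k
  · rw [combB, if_pos (Or.inr hkn)]
    rw [Nat.choose_eq_zero_of_lt (by omega)]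
    simp
  · rw [combB, if_neg (by omega)]
    have : k = ((k.toNat : Nat) : Int) := by omega
    rw [this]
    exact combB_fold n hn k.toNat (by omega)

theorem combB_pcount (c : Int) (L : Nat) (h0 : 0 ≤ c) (h35 : c ≤ 35) :
    combB (35 - c) ((L : Int) - 1) = pcount c L := by
  match L with
  | 0 =>
    rw [combB, if_pos (Or.inl (by norm_num))]
    simp [pcount]
  | (lq+1) =>
    rw [combB_eq_choose (35 - c) (((lq+1 : Nat) : Int) - 1) (by omega) (by push_cast; omega)]
    rw [pcount_eq_choose (lq+1) (by omega) c h0]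
    have hidx : ((((lq+1 : Nat) : Int)) - 1).toNat = (lq+1) - 1 := by omega
    rw [hidx]

theorem totals_bridge (L : Int) (h1 : 1 ≤ L) (h2 : L ≤ 36) :
    ((PySem.List.pyRange 0 36 1).map (fun c => pcount c L.toNat)).sum = combB 36 L := by
  have hmap : (PySem.List.pyRange 0 36 1).map (fun c => pcount c L.toNat)
      = (PySem.List.pyRange 0 36 1).map (fun c => (((35 - c).toNat.choose (L.toNat - 1) : Nat) : Int)) := by
    apply List.map_congr_left
    intro c hc
    rw [PySem.List.mem_pyRange_one] at hc
    exact pcount_eq_choose L.toNat (by omega) c (by omega)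
  rw [hmap]
  have hs := sum_choose (L.toNat - 1) 36 (by omega)
  have hz : (36 : Int) - ((36 : Nat) : Int) = 0 := by norm_num
  rw [hz] at hs
  have he : (L.toNat - 1) + 1 = L.toNat := by omega
  rw [he] at hs
  rw [hs, combB_eq_choose 36 L (by norm_num) (by omega)]
  congr 1

theorem lenInnerA_spec (L : Nat) (nth : Int) : ∀ (cs : List Int) (cum : Int) (m : Memo), Good m →
    ((lenInnerA cs L cum nth m).1 = true ↔ (cs ≠ [] ∧ nth ≤ cum + (cs.map (fun c => pcount c L)).sum))
    ∧ ((lenInnerA cs L cum nth m).1 = false → (lenInnerA cs L cum nth m).2.1 = cum + (cs.map (fun c => pcount c L)).sum)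
    ∧ Good (lenInnerA cs L cum nth m).2.2 := by
  intro cs
  induction cs with
  | nil =>
    intro cum m hm
    refine ⟨by simp [lenInnerA], by simp [lenInnerA], hm⟩
  | cons c rest ihc =>
    intro cum m hm
    obtain ⟨hc1, hc2⟩ := countA_spec L c m hm
    have hrest_nonneg : 0 ≤ (rest.map (fun c => pcount c L)).sum := by
      apply List.sum_nonneg
      intro x hx
      obtain ⟨i, _, rfl⟩ := List.mem_map.mp hx
      exact pcount_nonneg L i
    simp only [lenInnerA, List.map_cons, List.sum_cons]
    by_cases hif : nth ≤ cum + (countA c L m).1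
    · rw [if_pos hif]
      refine ⟨⟨fun _ => ⟨by simp, by rw [hc1] at hif; omega⟩, fun _ => rfl⟩, by simp, hc2⟩
    · rw [if_neg hif]
      obtain ⟨ih1, ih2, ih3⟩ := ihc (cum + (countA c L m).1) (countA c L m).2 hc2
      refine ⟨?_, ?_, ih3⟩
      · rw [ih1]
        rw [hc1] at hif ⊢
        constructor
        · rintro ⟨h, hle⟩
          exact ⟨by simp, by omega⟩
        · rintro ⟨-, hle⟩
          constructor
          · intro hnil
            subst hnil
            simp at hle
            omega
          · omega
      · intro hfalse
        rw [ih2 hfalse, hc1]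
        ring

theorem lenOuterA_spec (nth : Int) : ∀ (ls : List Int), (∀ L ∈ ls, 1 ≤ L ∧ L ≤ 36) →
    ∀ (cum : Int) (m : Memo), Good m →
    ((lenOuterA ls cum nth m).map (fun t => (t.1, t.2.1)) = findLenB ls cum nth)
    ∧ (∀ L sh m', lenOuterA ls cum nth m = some (L, sh, m') →
        Good m' ∧ 1 ≤ L ∧ L ≤ 36
        ∧ nth ≤ sh + ((PySem.List.pyRange 0 36 1).map (fun c => pcount c L.toNat)).sum
        ∧ (sh < nth ∨ (sh = cum ∧ ∃ rest, ls = L :: rest))) := by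
  intro ls
  induction ls with
  | nil =>
    intro _ cum m hm
    exact ⟨by simp [lenOuterA, findLenB], by intro L sh m' h; simp [lenOuterA] at h⟩
  | cons L rest ihl =>
    intro hmem cum m hm
    obtain ⟨hL1, hL36⟩ := hmem L (by simp)
    obtain ⟨hi1, hi2, hi3⟩ := lenInnerA_spec L.toNat nth (PySem.List.pyRange 0 36 1) cum m hm
    have hne : PySem.List.pyRange 0 36 1 ≠ [] := by
      rw [PySem.List.pyRange_one_cons (by norm_num)]
      simp
    have hbr := totals_bridge L hL1 hL36
    simp only [lenOuterA, findLenB]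
    by_cases hcond : nth ≤ cum + combB 36 L
    · have htrue : (lenInnerA (PySem.List.pyRange 0 36 1) L.toNat cum nth m).1 = true := by
        rw [hi1]; exact ⟨hne, by rw [hbr]; exact hcond⟩
      rw [htrue, if_pos hcond]
      simp only [if_true, Option.map_some]
      refine ⟨by trivial, ?_⟩
      intro L' sh m' h
      simp only [Option.some.injEq, Prod.mk.injEq] at h
      obtain ⟨rfl, rfl, rfl⟩ := h
      refine ⟨hi3, hL1, hL36, by rw [← hbr] at hcond; omega, Or.inr ⟨rfl, rest, rfl⟩⟩
    · have hfalse : (lenInnerA (PySem.List.pyRange 0 36 1) L.toNat cum nth m).1 = false := by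
        cases hb : (lenInnerA (PySem.List.pyRange 0 36 1) L.toNat cum nth m).1
        · rfl
        · exfalso
          have := hi1.mp hb
          rw [hbr] at this
          exact hcond this.2
      have hcum' : (lenInnerA (PySem.List.pyRange 0 36 1) L.toNat cum nth m).2.1 = cum + combB 36 L := by
        rw [hi2 hfalse, hbr]
      rw [hfalse, if_neg hcond]
      simp only [Bool.false_eq_true, if_false]
      rw [hcum']
      obtain ⟨ihA, ihB⟩ := ihl (fun x hx => hmem x (by simp [hx])) (cum + combB 36 L)
        (lenInnerA (PySem.List.pyRange 0 36 1) L.toNat cum nth m).2.2 hi3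
      refine ⟨ihA, ?_⟩
      intro L' sh m' h
      obtain ⟨g1, g2, g3, g4, g5⟩ := ihB L' sh m' h
      refine ⟨g1, g2, g3, g4, Or.inl ?_⟩
      rcases g5 with g5 | ⟨rfl, -⟩
      · exact g5
      · omega

theorem charInnerA_pickB (L : Nat) (nth : Int) : ∀ (cs : List Int), (∀ c ∈ cs, 0 ≤ c ∧ c ≤ 35) →
    ∀ (cum : Int) (m : Memo), Good m →
    ((charInnerA cs L cum nth m).1 = (pickB cs (L : Int) (nth - cum)).1)
    ∧ (∀ c, (charInnerA cs L cum nth m).1 = some c →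
        c ∈ cs
        ∧ (pickB cs (L : Int) (nth - cum)).2 = nth - (charInnerA cs L cum nth m).2.1 + pcount c L
        ∧ nth ≤ (charInnerA cs L cum nth m).2.1
        ∧ (cum < nth → (charInnerA cs L cum nth m).2.1 - pcount c L < nth))
    ∧ ((charInnerA cs L cum nth m).1 = none ↔ (cs = [] ∨ cum + (cs.map (fun c => pcount c L)).sum < nth))
    ∧ Good (charInnerA cs L cum nth m).2.2 := by
  intro cs
  induction cs with
  | nil =>
    intro _ cum m hm
    refine ⟨by simp [charInnerA, pickB], by intro c h; simp [charInnerA] at h, by simp [charInnerA], hm⟩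
  | cons c rest ihc =>
    intro hmem cum m hm
    obtain ⟨hc0, hc35⟩ := hmem c (by simp)
    have hcnt := combB_pcount c L hc0 hc35
    obtain ⟨ha1, ha2⟩ := countA_spec L c m hm
    have hrest_nonneg : 0 ≤ (rest.map (fun x => pcount x L)).sum := by
      apply List.sum_nonneg
      intro x hx
      obtain ⟨i, _, rfl⟩ := List.mem_map.mp hx
      exact pcount_nonneg L i
    simp only [charInnerA, pickB, List.map_cons, List.sum_cons]
    by_cases hif : nth ≤ cum + (countA c L m).1
    · rw [if_pos hif, if_pos (by rw [hcnt]; rw [ha1] at hif; omega)]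
      refine ⟨rfl, ?_, ?_, ha2⟩
      · intro c' h
        have hcc : c' = c := (Option.some.inj h).symm
        subst hcc
        refine ⟨by simp, by rw [ha1]; ring, hif, ?_⟩
        intro hcum
        dsimp only
        rw [ha1]
        omega
      · rw [ha1] at hif
        constructor
        · intro h; exact absurd h (by simp)
        · rintro (h | h)
          · simp at h
          · omega
    · rw [if_neg hif, if_neg (by rw [hcnt]; rw [ha1] at hif; omega)]
      have harg : nth - cum - combB (35 - c) ((L : Int) - 1) = nth - (cum + (countA c L m).1) := by
        rw [hcnt, ha1]; ring
      rw [harg]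
      obtain ⟨ih1, ih2, ih3, ih4⟩ := ihc (fun x hx => hmem x (by simp [hx])) (cum + (countA c L m).1) (countA c L m).2 ha2
      refine ⟨ih1, ?_, ?_, ih4⟩
      · intro c' h
        obtain ⟨g1, g2, g3, g4⟩ := ih2 c' h
        exact ⟨by simp [g1], g2, g3, fun _ => g4 (by rw [ha1] at hif ⊢; omega)⟩
      · rw [ih3, ha1] at *
        constructor
        · rintro (hnil | hlt)
          · subst hnil
            simp only [List.map_nil, List.sum_nil] at *
            right; omega
          · right; omega
        · rintro (h | h)
          · simp at h
          · by_cases hnil : rest = []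
            · exact Or.inl hnil
            · right
              subst_eqs
              omega

theorem mainLoopA_buildB : ∀ (L : Nat) (nth prev : Int) (res : List Char) (m : Memo),
    Good m →
    (1 ≤ L → (-1 ≤ prev ∧ prev ≤ 34 ∧ nth ≤ ((PySem.List.pyRange (prev + 1) 36 1).map (fun c => pcount c L)).sum)) →
    (2 ≤ L → 1 ≤ nth) →
    mainLoopA nth prev L res m = buildB (PySem.List.pyRange ((L : Nat) : Int) 0 (-1)) nth prev res := by
  intro L
  induction L with
  | zero =>
    intro nth prev res m _ _ _
    rw [PySem.List.pyRange_neg_one_eq_nil (by norm_num)]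
    simp [mainLoopA, buildB]
  | succ lp ih =>
    intro nth prev res m hm h1 h2
    obtain ⟨hp1, hp2, hp3⟩ := h1 (by omega)
    have hbounds : ∀ c ∈ PySem.List.pyRange (prev + 1) 36 1, 0 ≤ c ∧ c ≤ 35 := by
      intro c hc
      rw [PySem.List.mem_pyRange_one] at hc
      omega
    obtain ⟨g1, g2, g3, g4⟩ := charInnerA_pickB (lp+1) nth (PySem.List.pyRange (prev + 1) 36 1) hbounds 0 m hm
    have hz : nth - (0 : Int) = nth := by ring
    rw [hz] at g1 g2
    have hne : PySem.List.pyRange (prev + 1) 36 1 ≠ [] := by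
      rw [PySem.List.pyRange_one_cons (by omega)]; simp
    have hsome : (charInnerA (PySem.List.pyRange (prev + 1) 36 1) (lp+1) 0 nth m).1 ≠ none := by
      rw [Ne, g3]
      push Not
      exact ⟨hne, by omega⟩
    obtain ⟨c, hc⟩ := Option.ne_none_iff_exists'.mp hsome
    obtain ⟨w1, w2, w3, w4⟩ := g2 c hc
    obtain ⟨hcl, hcu⟩ := hbounds c w1
    obtain ⟨hq1, hq2⟩ := countA_spec (lp+1) c (charInnerA (PySem.List.pyRange (prev + 1) 36 1) (lp+1) 0 nth m).2.2 g4
    have hcons : PySem.List.pyRange (((lp+1 : Nat)) : Int) 0 (-1)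
        = (((lp+1 : Nat)) : Int) :: PySem.List.pyRange ((((lp+1 : Nat)) : Int) - 1) 0 (-1) :=
      PySem.List.pyRange_neg_one_cons (by push_cast; omega)
    have hstep : ((((lp+1 : Nat)) : Int) - 1) = ((lp : Nat) : Int) := by push_cast; ring
    rw [hcons, hstep]
    simp only [mainLoopA, buildB]
    rw [← g1] at *
    rw [hc]
    simp only [Option.getD_some]
    -- now both sides recurse; align the arguments
    rw [hq1, w2]
    have harg : nth - ((charInnerA (PySem.List.pyRange (prev + 1) 36 1) (lp+1) 0 nth m).2.1 - pcount c (lp+1))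
        = nth - (charInnerA (PySem.List.pyRange (prev + 1) 36 1) (lp+1) 0 nth m).2.1 + pcount c (lp+1) := by ring
    rw [harg]
    -- invariants for the next iteration
    by_cases hlp : 1 ≤ lp
    · have hnth1 : 1 ≤ nth := h2 (by omega)
      have hnext1 : 1 ≤ nth - (charInnerA (PySem.List.pyRange (prev + 1) 36 1) (lp+1) 0 nth m).2.1 + pcount c (lp+1) := by
        have := w4 (by omega)
        omega
      obtain ⟨lq, rfl⟩ : ∃ lq, lp = lq + 1 := ⟨lp - 1, by omega⟩
      have hpc : pcount c (lq+1+1) = ((PySem.List.pyRange (c + 1) 36 1).map (fun x => pcount x (lq+1))).sum := by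
        rw [pcount]
      have hnextle : nth - (charInnerA (PySem.List.pyRange (prev + 1) 36 1) (lq+1+1) 0 nth m).2.1 + pcount c (lq+1+1)
          ≤ pcount c (lq+1+1) := by omega
      have hc34 : c ≤ 34 := by
        by_contra hcon
        have hc35 : c = 35 := by omega
        subst hc35
        rw [PySem.List.pyRange_one_eq_nil (by norm_num)] at hpc
        simp at hpc
        omega
      apply ih
      · exact hq2
      · intro _
        refine ⟨by omega, hc34, ?_⟩
        rw [← hpc]
        omega
      · intro _
        exact hnext1
    · obtain ⟨rfl⟩ : lp = 0 := by omega
      rw [PySem.List.pyRange_neg_one_eq_nil (by norm_num)]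
      simp [mainLoopA, buildB]

theorem solve_eq_alt (nth : Int) : solve nth = solve_alt nth := by
  obtain ⟨hmapEq, hfacts⟩ := lenOuterA_spec nth (PySem.List.pyRange 1 37 1)
    (by intro L hL; rw [PySem.List.mem_pyRange_one] at hL; omega) 0 PySem.Dict.empty good_empty
  rw [solve, solve_alt]
  cases hA : lenOuterA (PySem.List.pyRange 1 37 1) 0 nth PySem.Dict.empty with
  | none =>
    rw [hA] at hmapEq
    simp only [Option.map_none] at hmapEq
    rw [← hmapEq]
  | some t =>
    obtain ⟨L, sh, m'⟩ := t
    rw [hA] at hmapEq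
    simp only [Option.map_some] at hmapEq
    rw [← hmapEq]
    obtain ⟨hg, hL1, hL36, hle, hdis⟩ := hfacts L sh m' hA
    have hshlt : 2 ≤ L → sh < nth := by
      intro h2
      rcases hdis with h | ⟨-, rest, hcons⟩
      · exact h
      · exfalso
        rw [PySem.List.pyRange_one_cons (by norm_num)] at hcons
        have : (1 : Int) = L := (List.cons.injEq .. ▸ hcons).1
        omega
    have hLt : ((L.toNat : Nat) : Int) = L := by omega
    have hmain := mainLoopA_buildB L.toNat (nth - sh) (-1) [] m' hg
      (by
        intro _
        refine ⟨by norm_num, by norm_num, ?_⟩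
        have : (-1 : Int) + 1 = 0 := by ring
        rw [this]
        omega)
      (by
        intro h2
        have : 2 ≤ L := by omega
        have := hshlt this
        omega)
    dsimp only
    rw [hmain, hLt]

-- ===== VERDICT (by name: the statement is the Claim_ definition above) =====
theorem solve_spec : Claim_equal_solve := by
  intro nth _
  unfold Spec_solve
  exact solve_eq_alt nth
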